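-- pv_equiv track=rewrite | github.com/oahshtsua/advent-of-code | 2015/day_01.py | part_two
-- ===== SOURCE A (Python) =====
-- def part_two(instructions: str) -> int:
--     idx = 0
--     curr_floor = 0
--     while idx < len(instructions):
--         if instructions[idx] == "(":
--             curr_floor += 1
--         else:
--             curr_floor -= 1
--
--         if curr_floor < 0:
--             break
--         idx += 1
--
--     return idx + 1
-- ===== SOURCE B (Python) =====
-- def part_two(instructions):
--     # Pass 1: build the full table of running floor values (prefix sums of +-1).
--     floors = []
--     f = 0
--     for c in instructions:
--         f += 1 if c == "(" else -1
--         floors.append(f)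
--     # Pass 2: first position where the floor is negative (1-based), else len+1.
--     return next((i + 1 for i, v in enumerate(floors) if v < 0),
--                 len(instructions) + 1)
-- ===== Notes on version B (the rewrite author's own statement) =====
-- stated objective: idiomatic
-- what changed: Replaces A's manual while-loop with index bookkeeping and break by a two-phase pipeline: build the table of running floor values, then next() over an enumerate generator with a len+1 default.
import Mathlib
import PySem

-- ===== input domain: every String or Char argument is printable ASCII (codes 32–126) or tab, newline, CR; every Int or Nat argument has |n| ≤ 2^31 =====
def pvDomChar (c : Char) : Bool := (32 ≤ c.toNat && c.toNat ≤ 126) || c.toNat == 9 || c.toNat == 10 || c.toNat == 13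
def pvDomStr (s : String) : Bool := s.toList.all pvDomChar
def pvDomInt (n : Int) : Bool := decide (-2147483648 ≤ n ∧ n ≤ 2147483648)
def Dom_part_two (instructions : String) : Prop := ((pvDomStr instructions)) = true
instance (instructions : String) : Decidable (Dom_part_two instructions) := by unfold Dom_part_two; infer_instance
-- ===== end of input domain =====

-- B changes the decomposition (table of running floors + search with default), not the value; return values proved equal on all inputs.

-- ===== PORT A =====
-- A's while loop: walk the characters carrying idx and curr_floor, break on negative.
def part_two_go : List Char → Int → Int → Int
  | [], idx, _ => idx + 1
  | c :: rest, idx, curr_floor =>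
      let f := if c = '(' then curr_floor + 1 else curr_floor - 1
      if f < 0 then idx + 1 else part_two_go rest (idx + 1) f

def part_two (instructions : String) : Int :=
  part_two_go instructions.toList 0 0

-- ===== PORT B =====
-- Source B pass 1: fold building the list of running floors.
def part_two_alt (instructions : String) : Int :=
  let floors := (instructions.toList.foldl
    (fun (acc : List Int × Int) c =>
      let f := acc.2 + (if c = '(' then 1 else -1)
      (acc.1 ++ [f], f)) ([], 0)).1
  -- Source B pass 2: next(...) with default len+1.
  match floors.findIdx? (fun v => v < 0) with
  | some i => (i : Int) + 1
  | none => (instructions.toList.length : Int) + 1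

-- ===== PRECONDITION & SPEC =====
def Spec_part_two (instructions : String) (out : Int) : Prop := out = part_two_alt instructions
instance (instructions : String) (out : Int) : Decidable (Spec_part_two instructions out) := by unfold Spec_part_two; infer_instance

-- ===== CLAIM (what is proved, stated in full; the proofs are below) =====
def Claim_equal_part_two : Prop := ∀ (instructions : String), Dom_part_two instructions → Spec_part_two instructions (part_two instructions)

-- ===== LEMMAS AND PROOFS =====

-- the running-floor table starting from floor f
def floorsFrom (f : Int) : List Char → List Int
  | [] => []
  | c :: rest =>
      let f' := f + (if c = '(' then 1 else -1)
      f' :: floorsFrom f' rest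

theorem foldl_floors (cs : List Char) (l0 : List Int) (f0 : Int) :
    (cs.foldl (fun (acc : List Int × Int) c =>
      let f := acc.2 + (if c = '(' then 1 else -1)
      (acc.1 ++ [f], f)) (l0, f0)).1 = l0 ++ floorsFrom f0 cs := by
  induction cs generalizing l0 f0 with
  | nil => simp [floorsFrom]
  | cons c rest ih => simp [List.foldl, floorsFrom, ih]

theorem go_eq_find (cs : List Char) (idx f : Int) :
    part_two_go cs idx f =
      match (floorsFrom f cs).findIdx? (fun v => v < 0) with
      | some i => idx + i + 1
      | none => idx + cs.length + 1 := by
  induction cs generalizing idx f with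
  | nil => simp [part_two_go, floorsFrom, List.findIdx?_nil]
  | cons c rest ih =>
      simp only [part_two_go, floorsFrom, List.findIdx?_cons]
      by_cases h : f + (if c = '(' then 1 else -1) < 0
      · have hc : (if c = '(' then f + 1 else f - 1) < 0 := by split_ifs at h ⊢ <;> omega
        simp [hc, h]
      · have hc : ¬ (if c = '(' then f + 1 else f - 1) < 0 := by split_ifs at h ⊢ <;> omega
        have he : (if c = '(' then f + 1 else f - 1) = f + (if c = '(' then 1 else -1) := by
          split_ifs <;> omega
        simp only [he, ih, decide_eq_true_eq, if_neg h]
        cases hfind : (floorsFrom (f + (if c = '(' then 1 else -1)) rest).findIdx? (fun v => v < 0) with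
        | none => simp; omega
        | some i => simp; omega

-- ===== VERDICT (by name: the statement is the Claim_ definition above) =====
theorem part_two_spec : Claim_equal_part_two := by
  intro s _
  unfold Spec_part_two part_two part_two_alt
  simp only [foldl_floors, List.nil_append, go_eq_find]
  have hlen : ∀ (f : Int) (cs : List Char), (floorsFrom f cs).length = cs.length := by
    intro f cs
    induction cs generalizing f with
    | nil => rfl
    | cons c rest ih => simp [floorsFrom, ih]
  cases hfind : (floorsFrom 0 s.toList).findIdx? (fun v => v < 0) with
  | none => simp
  | some i => simp
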